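-- pv_equiv track=rewrite | github.com/qjiangzhao/TEtrimmerPaperFile | MSA_cleaning_for_Fig2/TEtrimmer_paper_MSA_cleaning_and_benchmarking_code.py | count_gap_differences
-- ===== SOURCE A (Python) =====
-- def count_gap_differences(treated1, treated2):
--     """Count differences in gap placements between two alignments."""
--     gap_in_manual_not_software = 0
--     gap_in_software_not_manual = 0
--
--     for seq_index in range(len(treated1)):  # Iterate over each sequence
--         for pos_index in range(len(treated1[seq_index])):  # Iterate over each position
--             nuc1 = treated1[seq_index][pos_index]
--             nuc2 = treated2[seq_index][pos_index]
--             if nuc1 == "-" and nuc2 != "-":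
--                 gap_in_manual_not_software += 1
--             elif nuc1 != "-" and nuc2 == "-":
--                 gap_in_software_not_manual += 1
--
--     return gap_in_manual_not_software, gap_in_software_not_manual
-- ===== SOURCE B (Python) =====
-- def count_gap_differences(treated1, treated2):
--     """Count differences in gap placements between two alignments."""
--     gap_in_manual_not_software = 0
--     gap_in_software_not_manual = 0
--
--     for row1, row2 in zip(treated1, treated2):
--         pairs = list(zip(row1, row2))
--         both = sum(1 for a, b in pairs if a == "-" and b == "-")
--         gap_in_manual_not_software += sum(1 for a, b in pairs if a == "-") - both
--         gap_in_software_not_manual += sum(1 for a, b in pairs if b == "-") - both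
--
--     return gap_in_manual_not_software, gap_in_software_not_manual
-- ===== Notes on version B (the rewrite author's own statement) =====
-- stated objective: alternative
-- what changed: Replaces the per-position if/elif classification over index ranges by an arithmetic derivation over zipped rows: count gaps in each column of the zipped pairs and the columns gapped in both, and add gaps1-both and gaps2-both; Pre_ excludes only the inputs on which A raises IndexError (treated2 exhausted at a nonempty row, or an aligned row of treated2 shorter than treated1's row).
import Mathlib
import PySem

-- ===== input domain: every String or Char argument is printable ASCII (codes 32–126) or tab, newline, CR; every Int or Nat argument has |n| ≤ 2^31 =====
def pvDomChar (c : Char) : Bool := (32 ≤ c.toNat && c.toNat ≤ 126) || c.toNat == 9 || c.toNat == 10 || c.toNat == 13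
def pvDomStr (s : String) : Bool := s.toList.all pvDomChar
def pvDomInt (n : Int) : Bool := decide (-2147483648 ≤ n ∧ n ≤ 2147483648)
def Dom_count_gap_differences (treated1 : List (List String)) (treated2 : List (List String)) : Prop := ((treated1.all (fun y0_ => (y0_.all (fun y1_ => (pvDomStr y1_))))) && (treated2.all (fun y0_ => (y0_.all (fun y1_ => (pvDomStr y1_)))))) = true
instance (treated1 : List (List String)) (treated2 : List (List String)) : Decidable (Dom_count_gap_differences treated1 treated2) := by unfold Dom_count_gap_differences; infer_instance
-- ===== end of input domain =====

-- B replaces A's per-position if/elif counters over index ranges by an arithmetic derivation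
-- (gaps1 - both, gaps2 - both) over zipped rows and zipped positions; alternative decomposition, same cost.


-- ===== PORT A =====
def count_gap_differences (treated1 : List (List String)) (treated2 : List (List String)) : Int × Int :=
  (PySem.List.pyRange 0 (treated1.length : Int) 1).foldl (fun acc seq_index =>
    let row1 := PySem.List.pyGetD treated1 seq_index []
    let row2 := PySem.List.pyGetD treated2 seq_index []
    (PySem.List.pyRange 0 (row1.length : Int) 1).foldl (fun acc2 pos_index =>
      let nuc1 := PySem.List.pyGetD row1 pos_index ""
      let nuc2 := PySem.List.pyGetD row2 pos_index ""
      if nuc1 = "-" ∧ ¬ nuc2 = "-" then (acc2.1 + 1, acc2.2)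
      else if ¬ nuc1 = "-" ∧ nuc2 = "-" then (acc2.1, acc2.2 + 1)
      else acc2) acc) ((0 : Int), (0 : Int))

-- ===== PORT B =====
def count_gap_differences_alt (treated1 : List (List String)) (treated2 : List (List String)) : Int × Int :=
  (treated1.zip treated2).foldl (fun acc rr =>
    let pairs := rr.1.zip rr.2
    let both : Int := (pairs.countP (fun p => decide (p.1 = "-" ∧ p.2 = "-")) : Nat)
    let g1 : Int := (pairs.countP (fun p => decide (p.1 = "-")) : Nat)
    let g2 : Int := (pairs.countP (fun p => decide (p.2 = "-")) : Nat)
    (acc.1 + (g1 - both), acc.2 + (g2 - both))) ((0 : Int), (0 : Int))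

-- ===== PRECONDITION & SPEC =====
-- Pre_ excludes exactly the inputs on which A raises IndexError: an aligned row of treated2
-- shorter than treated1's row, or a nonempty row of treated1 beyond treated2's end.
def Pre_count_gap_differences (treated1 : List (List String)) (treated2 : List (List String)) : Prop :=
  (∀ p ∈ treated1.zip treated2, p.1.length ≤ p.2.length) ∧ (∀ r ∈ treated1.drop treated2.length, r = [])
instance (treated1 : List (List String)) (treated2 : List (List String)) : Decidable (Pre_count_gap_differences treated1 treated2) := by unfold Pre_count_gap_differences; infer_instance
def pvWitness_count_gap_differences : List (List String) × List (List String) := ([["-", "a"]], [["a", "-"]])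

def Spec_count_gap_differences (treated1 : List (List String)) (treated2 : List (List String)) (out : Int × Int) : Prop := out = count_gap_differences_alt treated1 treated2
instance (treated1 : List (List String)) (treated2 : List (List String)) (out : Int × Int) : Decidable (Spec_count_gap_differences treated1 treated2 out) := by unfold Spec_count_gap_differences; infer_instance

-- ===== CLAIM (what is proved, stated in full; the proofs are below) =====
def Claim_equal_count_gap_differences : Prop := ∀ (treated1 : List (List String)) (treated2 : List (List String)), Dom_count_gap_differences treated1 treated2 → Pre_count_gap_differences treated1 treated2 → Spec_count_gap_differences treated1 treated2 (count_gap_differences treated1 treated2)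

-- ===== LEMMAS AND PROOFS =====

-- a fold whose body fixes the accumulator on every element of the list is the identity
lemma foldl_id_of_mem {γ : Type} (g : γ → Nat → γ) :
    ∀ (l : List Nat) (acc : γ), (∀ a k, k ∈ l → g a k = a) → l.foldl g acc = acc := by
  intro l
  induction l with
  | nil => intro acc _; simp
  | cons x l ih =>
    intro acc h
    simp only [List.foldl_cons, h acc x (List.mem_cons_self)]
    exact ih acc (fun a k hk => h a k (List.mem_cons_of_mem _ hk))

-- drop the tail of a range fold when the body is the identity there
lemma foldl_range_split {γ : Type} (g : γ → Nat → γ) (m n : Nat) (hmn : m ≤ n)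
    (hid : ∀ a k, m ≤ k → k < n → g a k = a) (acc : γ) :
    (List.range n).foldl g acc = (List.range m).foldl g acc := by
  have h : n = m + (n - m) := by omega
  rw [h, List.range_add, List.foldl_append]
  exact foldl_id_of_mem g _ _ (by
    intro a k hk
    simp only [List.mem_map, List.mem_range] at hk
    obtain ⟨j, hj, rfl⟩ := hk
    exact hid a (m + j) (by omega) (by omega))

-- an index loop over the zip's length with getD is the fold over the zip
lemma foldl_range_zip {α β γ : Type} (f : γ → α → β → γ) (d1 : α) (d2 : β) :
    ∀ (xs : List α) (ys : List β) (acc : γ),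
      (List.range (xs.zip ys).length).foldl (fun a k => f a (xs.getD k d1) (ys.getD k d2)) acc
        = (xs.zip ys).foldl (fun a p => f a p.1 p.2) acc := by
  intro xs
  induction xs with
  | nil => intro ys acc; simp
  | cons x xs ih =>
    intro ys acc
    cases ys with
    | nil => simp
    | cons y ys =>
      simp only [List.zip_cons_cons, List.length_cons, List.range_succ_eq_map,
        List.foldl_cons, List.foldl_map, List.getD_cons_zero, List.getD_cons_succ]
      exact ih ys (f acc x y)

-- bridge: the PySem pyRange/pyGetD loop is the List.range/getD loop
lemma pyloop_eq_rangeloop {α β γ : Type} (f : γ → α → β → γ) (d1 : α) (d2 : β)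
    (xs : List α) (ys : List β) (acc : γ) :
    (PySem.List.pyRange 0 (xs.length : Int) 1).foldl
        (fun a i => f a (PySem.List.pyGetD xs i d1) (PySem.List.pyGetD ys i d2)) acc
      = (List.range xs.length).foldl (fun a k => f a (xs.getD k d1) (ys.getD k d2)) acc := by
  rw [PySem.List.pyRange_one]
  simp [List.foldl_map]

-- A's inner classification loop counts the two disjoint kinds of positions
lemma classify_foldl :
    ∀ (l : List (String × String)) (acc : Int × Int),
      l.foldl (fun a p =>
          if p.1 = "-" ∧ ¬ p.2 = "-" then (a.1 + 1, a.2)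
          else if ¬ p.1 = "-" ∧ p.2 = "-" then (a.1, a.2 + 1)
          else a) acc
        = (acc.1 + (l.countP (fun p => decide (p.1 = "-" ∧ ¬ p.2 = "-")) : Nat),
           acc.2 + (l.countP (fun p => decide (¬ p.1 = "-" ∧ p.2 = "-")) : Nat)) := by
  intro l
  induction l with
  | nil => intro acc; simp
  | cons p l ih =>
    intro acc
    simp only [List.foldl_cons, List.countP_cons]
    by_cases h1 : p.1 = "-" <;> by_cases h2 : p.2 = "-" <;>
      simp [h1, h2, ih] <;> omega

-- the one-sided counts of A are B's column gap counts minus the both-gap count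
lemma counts_split : ∀ (l : List (String × String)),
    (l.countP (fun p => decide (p.1 = "-" ∧ ¬ p.2 = "-"))
        + l.countP (fun p => decide (p.1 = "-" ∧ p.2 = "-")) = l.countP (fun p => decide (p.1 = "-"))
      ∧ l.countP (fun p => decide (¬ p.1 = "-" ∧ p.2 = "-"))
        + l.countP (fun p => decide (p.1 = "-" ∧ p.2 = "-")) = l.countP (fun p => decide (p.2 = "-"))) := by
  intro l
  induction l with
  | nil => simp
  | cons p l ih =>
    by_cases h1 : p.1 = "-" <;> by_cases h2 : p.2 = "-" <;>
      simp [h1, h2] at ih ⊢ <;> omega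

-- A's inner loop, named so the outer loop's body is an application (proof helper)
def innerLoopA (r1 r2 : List String) (a : Int × Int) : Int × Int :=
  (PySem.List.pyRange 0 (r1.length : Int) 1).foldl (fun acc2 pos_index =>
      let nuc1 := PySem.List.pyGetD r1 pos_index ""
      let nuc2 := PySem.List.pyGetD r2 pos_index ""
      if nuc1 = "-" ∧ ¬ nuc2 = "-" then (acc2.1 + 1, acc2.2)
      else if ¬ nuc1 = "-" ∧ nuc2 = "-" then (acc2.1, acc2.2 + 1)
      else acc2) a

lemma inner_eq (r1 r2 : List String) (h : r1.length ≤ r2.length) (a : Int × Int) :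
    innerLoopA r1 r2 a
      = (a.1 + ((r1.zip r2).countP (fun p => decide (p.1 = "-" ∧ ¬ p.2 = "-")) : Nat),
         a.2 + ((r1.zip r2).countP (fun p => decide (¬ p.1 = "-" ∧ p.2 = "-")) : Nat)) := by
  have hz : r1.length = (r1.zip r2).length := by simp [List.length_zip]; omega
  refine (pyloop_eq_rangeloop (fun a2 n1 n2 =>
        if n1 = "-" ∧ ¬ n2 = "-" then (a2.1 + 1, a2.2)
        else if ¬ n1 = "-" ∧ n2 = "-" then (a2.1, a2.2 + 1)
        else a2) "" "" r1 r2 a).trans ?_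
  rw [hz]
  exact (foldl_range_zip (fun a2 n1 n2 =>
        if n1 = "-" ∧ ¬ n2 = "-" then (a2.1 + 1, a2.2)
        else if ¬ n1 = "-" ∧ n2 = "-" then (a2.1, a2.2 + 1)
        else a2) "" "" r1 r2 a).trans (classify_foldl (r1.zip r2) a)

-- ===== VERDICT (by name: the statement is the Claim_ definition above) =====
theorem count_gap_differences_spec : Claim_equal_count_gap_differences := by
  intro t1 t2 _ hpre
  rcases hpre with ⟨hrows, htail⟩
  unfold Spec_count_gap_differences
  -- A's outer loop: shrink to the zip's length (trailing rows of t1 are empty), then fold the zip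
  have h1 : count_gap_differences t1 t2
      = (t1.zip t2).foldl (fun a p => innerLoopA p.1 p.2 a) (0, 0) := by
    refine (pyloop_eq_rangeloop (fun a r1 r2 => innerLoopA r1 r2 a)
      ([] : List String) ([] : List String) t1 t2 (0, 0)).trans ?_
    have hmin : (t1.zip t2).length ≤ t1.length := by simp [List.length_zip]
    refine (foldl_range_split _ (t1.zip t2).length t1.length hmin ?_ _).trans
      (foldl_range_zip (fun a r1 r2 => innerLoopA r1 r2 a) [] [] t1 t2 (0, 0))
    intro a k hk1 hk2
    have hk2' : t2.length ≤ k := by simp [List.length_zip] at hk1; omega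
    have hempty : t1.getD k [] = [] := by
      have hmem : t1[k]'hk2 ∈ t1.drop t2.length := by
        rw [List.mem_iff_getElem]
        exact ⟨k - t2.length, by simp [List.length_drop]; omega,
          by rw [List.getElem_drop]; congr 1; omega⟩
      rw [List.getD_eq_getElem _ _ hk2]
      exact htail _ hmem
    simp only [hempty, innerLoopA]
    simp [PySem.List.pyRange]
  rw [h1]
  refine PySem.List.foldl_congr_mem (t1.zip t2) (fun a p => innerLoopA p.1 p.2 a)
    (fun acc rr =>
      let pairs := rr.1.zip rr.2
      let both : Int := (pairs.countP (fun p => decide (p.1 = "-" ∧ p.2 = "-")) : Nat)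
      let g1 : Int := (pairs.countP (fun p => decide (p.1 = "-")) : Nat)
      let g2 : Int := (pairs.countP (fun p => decide (p.2 = "-")) : Nat)
      (acc.1 + (g1 - both), acc.2 + (g2 - both)))
    (0, 0) ?_
  intro acc p hp
  have hrow := hrows p hp
  beta_reduce
  rw [inner_eq p.1 p.2 hrow acc]
  have hc := counts_split (p.1.zip p.2)
  refine Prod.ext ?_ ?_ <;> simp only at hc ⊢ <;> omega
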